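-- pv_equiv track=rewrite | github.com/baothais/unit_testing | practice_python/practice4.py | parity_analysis
-- ===== SOURCE A (Python) =====
-- def parity_analysis(num):
--     str_num = str(num)
--     sum = 0
--     for i in str_num:
--         sum += int(i)
--     if num % 2 != 0 and sum % 2 != 0:
--         return True
--     if num % 2 == 0 and sum % 2 == 0:
--         return True
--     return False
-- ===== SOURCE B (Python) =====
-- def parity_analysis(num):
--     # num's parity equals its last decimal digit's parity, so the parities match
--     # exactly when the sum of all digits EXCEPT the last is even.
--     s = sum(int(c) for c in str(num)[:-1])
--     return s % 2 == 0
-- ===== Notes on version B (the rewrite author's own statement) =====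
-- stated objective: simpler
-- what changed: B never computes the number's own parity nor compares two parities: since a decimal number's parity equals that of its last digit, B sums only the digits of str(num)[:-1] and returns whether that partial sum is even.
import Mathlib
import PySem

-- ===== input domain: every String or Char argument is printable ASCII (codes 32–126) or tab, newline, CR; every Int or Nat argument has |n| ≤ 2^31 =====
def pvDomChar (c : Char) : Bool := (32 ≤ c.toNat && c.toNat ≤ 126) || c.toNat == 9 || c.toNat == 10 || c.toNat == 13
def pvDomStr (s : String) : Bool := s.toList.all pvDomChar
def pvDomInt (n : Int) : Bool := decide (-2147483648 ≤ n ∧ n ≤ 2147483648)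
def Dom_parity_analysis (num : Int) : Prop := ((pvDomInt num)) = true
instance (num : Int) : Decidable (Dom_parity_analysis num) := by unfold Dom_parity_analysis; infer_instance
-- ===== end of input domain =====

-- B drops the parity comparison: a decimal number's parity equals its last digit's, so B just checks that the sum of all digits except the last is even (simpler; same cost).


-- ===== PORT A =====
-- int(i) for a one-character string i → PySem.Int.ofChars? [c]; it is none only for
-- the '-' sign char, which Pre_ excludes (num < 0), so .getD 0 is never taken.
def parity_analysis (num : Int) : Bool :=
  let str_num := PySem.Int.toChars num
  let sum := str_num.foldl (fun s c => s + (PySem.Int.ofChars? [c]).getD 0) 0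
  if PySem.Int.mod num 2 ≠ 0 ∧ PySem.Int.mod sum 2 ≠ 0 then true
  else if PySem.Int.mod num 2 = 0 ∧ PySem.Int.mod sum 2 = 0 then true
  else false

-- ===== PORT B =====
def parity_analysis_alt (num : Int) : Bool :=
  let s := ((PySem.List.slice (PySem.Int.toChars num) none (some (-1))).map
      (fun c => (PySem.Int.ofChars? [c]).getD 0)).sum
  PySem.Int.mod s 2 == 0

-- ===== PRECONDITION & SPEC =====
-- Pre_ excludes negative num, where str(num) starts with '-' and int('-') raises ValueError in A (and in B).
def Pre_parity_analysis (num : Int) : Prop := 0 ≤ num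
instance (num : Int) : Decidable (Pre_parity_analysis num) := by unfold Pre_parity_analysis; infer_instance
def pvWitness_parity_analysis : Int := (7)
def Spec_parity_analysis (num : Int) (out : Bool) : Prop := out = parity_analysis_alt num
instance (num : Int) (out : Bool) : Decidable (Spec_parity_analysis num out) := by unfold Spec_parity_analysis; infer_instance

-- ===== CLAIM (what is proved, stated in full; the proofs are below) =====
def Claim_equal_parity_analysis : Prop := ∀ (num : Int), Dom_parity_analysis num → Pre_parity_analysis num → Spec_parity_analysis num (parity_analysis num)

-- ===== LEMMAS AND PROOFS =====

-- toDigitsCore's accumulator is just appended to the result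
lemma toDigitsCore_acc (fuel : ℕ) : ∀ (n : ℕ) (ds : List Char),
    Nat.toDigitsCore 10 fuel n ds = Nat.toDigitsCore 10 fuel n [] ++ ds := by
  induction fuel with
  | zero => intro n ds; simp [Nat.toDigitsCore]
  | succ f ih =>
    intro n ds
    simp only [Nat.toDigitsCore]
    by_cases h : n / 10 = 0
    · simp [h]
    · simp only [h, if_false]
      rw [ih (n / 10) (Nat.digitChar (n % 10) :: ds), ih (n / 10) [Nat.digitChar (n % 10)]]
      simp

-- str(m) ends in the digit character of m % 10
lemma toDigits_last (m : ℕ) : ∃ ds, Nat.toDigits 10 m = ds ++ [Nat.digitChar (m % 10)] := by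
  unfold Nat.toDigits
  simp only [Nat.toDigitsCore]
  by_cases h : m / 10 = 0
  · exact ⟨[], by simp [h]⟩
  · refine ⟨Nat.toDigitsCore 10 m (m / 10) [], ?_⟩
    simp [h, toDigitsCore_acc m (m / 10) [Nat.digitChar (m % 10)]]

lemma val_digitChar (d : ℕ) (h : d < 10) :
    (PySem.Int.ofChars? [Nat.digitChar d]).getD 0 = (d : ℤ) := by
  interval_cases d <;> decide

lemma slice_neg_one (xs : List Char) :
    PySem.List.slice xs none (some (-1)) = xs.dropLast := by
  simp [PySem.List.slice, PySem.List.clampIdx]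
  split_ifs with h
  · simp [h]
  · rw [List.dropLast_eq_take]
    congr 1
    omega

-- ===== VERDICT (by name: the statement is the Claim_ definition above) =====
theorem parity_analysis_spec : Claim_equal_parity_analysis := by
  intro num _ hpre
  unfold Spec_parity_analysis parity_analysis parity_analysis_alt
  obtain ⟨m, rfl⟩ : ∃ m : ℕ, num = (m : ℤ) := ⟨num.toNat, (Int.toNat_of_nonneg hpre).symm⟩
  have htc : PySem.Int.toChars (m : ℤ) = Nat.toDigits 10 m := by simp [PySem.Int.toChars]
  obtain ⟨ds, hds⟩ := toDigits_last m
  simp only [htc, hds, slice_neg_one, List.dropLast_concat]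
  rw [List.foldl_append, List.sum_eq_foldl, List.foldl_map]
  set S := ds.foldl (fun s c => s + (PySem.Int.ofChars? [c]).getD 0) 0 with hS
  simp only [List.foldl_cons, List.foldl_nil]
  simp only [val_digitChar (m % 10) (Nat.mod_lt m (by norm_num))]
  simp only [PySem.Int.mod_eq_emod_of_pos (by norm_num : (0:ℤ) < 2)]
  split_ifs with h1 h2
  · symm; rw [beq_iff_eq]; omega
  · symm; rw [beq_iff_eq]; omega
  · push Not at h1 h2
    symm; rw [beq_eq_false_iff_ne]; omega
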